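-- pv_equiv track=rewrite | github.com/davidcbc/aoc | 2020/python/day18-2.py | doAllAddition
-- ===== SOURCE A (Python) =====
-- def doAllAddition(statement):
--     newStatement = []
--     toAdd = []
--     for i in range(len(statement)):
--         if statement[i] == "*":
--             newStatement.append(str(sum(toAdd)))
--             newStatement.append("*")
--             toAdd = []
--         elif statement[i] != "+":
--             toAdd.append(int(statement[i]))
--     if len(toAdd) > 0:
--         newStatement.append(str(sum(toAdd)))
--     return newStatement
-- ===== SOURCE B (Python) =====
-- def doAllAddition(statement):
--     # Pass 1: partition tokens into groups delimited by "*" (no parsing yet).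
--     done = []
--     cur = []
--     for tok in statement:
--         if tok == "*":
--             done.append(cur)
--             cur = []
--         else:
--             cur.append(tok)
--     # Pass 2: render each completed group as its sum followed by "*".
--     out = []
--     for g in done:
--         out.append(str(sum(int(t) for t in g if t != "+")))
--         out.append("*")
--     lastVals = [int(t) for t in cur if t != "+"]
--     if lastVals:
--         out.append(str(sum(lastVals)))
--     return out
-- ===== Notes on version B (the rewrite author's own statement) =====
-- stated objective: alternative
-- what changed: B first partitions the token list into groups delimited by '*' without parsing, then renders each group's sum in a second pass, instead of A's single pass that parses digits into a running int accumulator and emits output inline.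
import Mathlib
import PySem

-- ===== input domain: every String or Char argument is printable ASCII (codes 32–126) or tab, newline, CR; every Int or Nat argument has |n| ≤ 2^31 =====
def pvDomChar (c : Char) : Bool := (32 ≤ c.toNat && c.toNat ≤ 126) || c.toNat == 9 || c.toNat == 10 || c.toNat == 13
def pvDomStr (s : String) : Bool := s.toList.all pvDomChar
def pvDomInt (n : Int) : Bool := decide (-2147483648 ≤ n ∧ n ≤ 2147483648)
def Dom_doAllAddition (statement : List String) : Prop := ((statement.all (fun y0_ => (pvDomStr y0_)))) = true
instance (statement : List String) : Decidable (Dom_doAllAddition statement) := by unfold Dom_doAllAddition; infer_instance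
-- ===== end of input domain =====

-- B partitions the tokens into '*'-delimited groups first and renders sums in a second
-- pass, instead of A's single pass with a running int accumulator; return values agree
-- on all inputs where A returns (Pre_ excludes only tokens on which int() raises).

-- ===== PORT A =====
-- A: one pass, state = (output so far, ints accumulated since the last '*').
def doAllAddition (statement : List String) : List String :=
  let st := statement.foldl
    (fun (acc : List String × List Int) s =>
      if s == "*" then
        (acc.1 ++ [PySem.Int.toStr acc.2.sum, "*"], [])
      else if s != "+" then
        (acc.1, acc.2 ++ [(PySem.Int.ofStr? s).getD 0])
      else acc)
    ([], [])
  if st.2.length > 0 then st.1 ++ [PySem.Int.toStr st.2.sum] else st.1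

-- ===== PORT B =====
-- B pass 1: split the token list on "*" into (completed groups, current group).
def pvSplitStar (statement : List String) : List (List String) × List String :=
  statement.foldl
    (fun (acc : List (List String) × List String) tok =>
      if tok == "*" then (acc.1 ++ [acc.2], [])
      else (acc.1, acc.2 ++ [tok]))
    ([], [])

-- B: parsed values of one group (tokens that are not "+").
def pvGroupVals (g : List String) : List Int :=
  (g.filter (fun t => t != "+")).map (fun t => (PySem.Int.ofStr? t).getD 0)

def doAllAddition_alt (statement : List String) : List String :=
  let p := pvSplitStar statement
  let out := p.1.foldl
    (fun o g => o ++ [PySem.Int.toStr (pvGroupVals g).sum, "*"]) []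
  let lastVals := pvGroupVals p.2
  if lastVals ≠ [] then out ++ [PySem.Int.toStr lastVals.sum] else out

-- ===== PRECONDITION & SPEC =====
-- Exactly the inputs where Python A returns: every token other than "*" and "+" parses with int().
def Pre_doAllAddition (statement : List String) : Prop :=
  ∀ t ∈ statement, t = "*" ∨ t = "+" ∨ (PySem.Int.ofStr? t).isSome = true
instance (statement : List String) : Decidable (Pre_doAllAddition statement) := by
  unfold Pre_doAllAddition; infer_instance
def pvWitness_doAllAddition : List String := ["3", "+", "4", "*", "5"]

def Spec_doAllAddition (statement : List String) (out : List String) : Prop := out = doAllAddition_alt statement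
instance (statement : List String) (out : List String) : Decidable (Spec_doAllAddition statement out) := by unfold Spec_doAllAddition; infer_instance

-- ===== CLAIM (what is proved, stated in full; the proofs are below) =====
def Claim_equal_doAllAddition : Prop := ∀ (statement : List String), Dom_doAllAddition statement → Pre_doAllAddition statement → Spec_doAllAddition statement (doAllAddition statement)

-- ===== LEMMAS AND PROOFS =====

-- render B's completed groups from an arbitrary prefix
def pvRend (done : List (List String)) : List String :=
  done.foldl (fun o g => o ++ [PySem.Int.toStr (pvGroupVals g).sum, "*"]) []

theorem pvRend_snoc (done : List (List String)) (g : List String) :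
    pvRend (done ++ [g]) = pvRend done ++ [PySem.Int.toStr (pvGroupVals g).sum, "*"] := by
  simp [pvRend, List.foldl_append]

theorem pvGroupVals_snoc (g : List String) (t : String) :
    pvGroupVals (g ++ [t]) =
      pvGroupVals g ++ (if t ≠ "+" then [(PySem.Int.ofStr? t).getD 0] else []) := by
  simp [pvGroupVals, List.filter_append]
  split <;> simp_all

-- loop invariant: A's fold state is B's fold state rendered/parsed
theorem pv_loop (xs : List String) :
    ∀ (done : List (List String)) (cur : List String),
    (xs.foldl
      (fun (acc : List String × List Int) s =>
        if s == "*" then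
          (acc.1 ++ [PySem.Int.toStr acc.2.sum, "*"], [])
        else if s != "+" then
          (acc.1, acc.2 ++ [(PySem.Int.ofStr? s).getD 0])
        else acc)
      (pvRend done, pvGroupVals cur)) =
    (pvRend (xs.foldl
        (fun (acc : List (List String) × List String) tok =>
          if tok == "*" then (acc.1 ++ [acc.2], [])
          else (acc.1, acc.2 ++ [tok]))
        (done, cur)).1,
     pvGroupVals (xs.foldl
        (fun (acc : List (List String) × List String) tok =>
          if tok == "*" then (acc.1 ++ [acc.2], [])
          else (acc.1, acc.2 ++ [tok]))
        (done, cur)).2) := by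
  induction xs with
  | nil => intro done cur; rfl
  | cons x xs ih =>
    intro done cur
    by_cases hx : x = "*"
    · subst hx
      simpa [pvRend_snoc, pvGroupVals] using ih (done ++ [cur]) []
    · by_cases hp : x = "+"
      · subst hp
        simpa [pvGroupVals_snoc] using ih done (cur ++ ["+"])
      · have h1 : (x == "*") = false := by simp [hx]
        have h2 : (x != "+") = true := by simp [hp]
        simpa [hx, hp, h1, h2, pvGroupVals_snoc] using ih done (cur ++ [x])

-- ===== VERDICT (by name: the statement is the Claim_ definition above) =====
theorem doAllAddition_spec : Claim_equal_doAllAddition := by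
  intro statement _ _
  show doAllAddition statement = doAllAddition_alt statement
  have h0 : pvRend ([] : List (List String)) = [] := rfl
  have h1 : pvGroupVals ([] : List String) = [] := rfl
  have h := pv_loop statement [] []
  rw [h0, h1] at h
  have hr : ∀ d : List (List String),
      d.foldl (fun o g => o ++ [PySem.Int.toStr (pvGroupVals g).sum, "*"]) [] = pvRend d :=
    fun _ => rfl
  simp only [doAllAddition, doAllAddition_alt, pvSplitStar, h, hr]
  split_ifs with hA hB hB <;> simp_all [List.length_pos_iff]
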